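-- pv_equiv track=rewrite | github.com/xdtianyu/android-7.0.0_r1 | external/autotest/tko/utils.py | drop_redundant_messages
-- ===== SOURCE A (Python) =====
-- def drop_redundant_messages(messages):
--     """ Given a set of message strings discard any 'redundant' messages which
--     are simple a substring of the existing ones.
--
--     @param messages - a set of message strings
--
--     @return - a subset of messages with unnecessary strings dropped
--     """
--     sorted_messages = sorted(messages, key=len, reverse=True)
--     filtered_messages = set()
--     for message in sorted_messages:
--         for filtered_message in filtered_messages:
--             if message in filtered_message:
--                 break
--         else:
--             filtered_messages.add(message)
--     return filtered_messages
-- ===== SOURCE B (Python) =====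
-- def drop_redundant_messages(messages):
--     """Keep only the messages that are not substrings of another message.
--
--     Sieve formulation: repeatedly commit the first remaining (longest)
--     message and prune from the remaining list everything it contains,
--     instead of testing each message against an accumulated kept-set.
--     """
--     remaining = sorted(messages, key=len, reverse=True)
--     kept = []
--     while remaining:
--         m = remaining[0]
--         kept.append(m)
--         remaining = [o for o in remaining[1:] if o not in m]
--     return set(kept)
-- ===== Notes on version B (the rewrite author's own statement) =====
-- stated objective: alternative
-- what changed: A incrementally builds a kept-set and tests each new message against everything kept so far; B is a sieve: it commits the first remaining (longest) message and prunes from the remaining list every message it contains, so no kept-set is consulted at all.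
import Mathlib
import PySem

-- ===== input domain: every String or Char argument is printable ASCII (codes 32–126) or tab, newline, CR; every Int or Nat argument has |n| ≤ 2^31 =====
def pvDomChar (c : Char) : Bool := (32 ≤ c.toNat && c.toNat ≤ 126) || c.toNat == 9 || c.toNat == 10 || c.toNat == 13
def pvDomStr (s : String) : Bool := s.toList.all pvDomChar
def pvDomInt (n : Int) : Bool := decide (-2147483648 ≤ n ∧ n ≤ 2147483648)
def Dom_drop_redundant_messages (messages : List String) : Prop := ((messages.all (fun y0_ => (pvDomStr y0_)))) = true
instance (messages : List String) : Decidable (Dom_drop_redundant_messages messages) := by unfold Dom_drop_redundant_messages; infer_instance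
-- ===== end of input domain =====

-- B replaces A's incremental kept-set filter by a sieve over the sorted list: commit the first
-- remaining message, prune everything it contains, repeat. Objective: alternative decomposition.

-- ===== PORT A =====
def drop_redundant_messages (messages : List String) : List String :=
  let sorted_messages := PySem.List.sorted messages (fun m => PySem.Str.len m) true
  sorted_messages.foldl
    (fun filtered_messages message =>
      if filtered_messages.any (fun filtered_message => PySem.Str.isIn message filtered_message)
      then filtered_messages
      else PySem.Set.add filtered_messages message)
    PySem.Set.empty

-- ===== PORT B =====
-- the while-loop of Source B: head goes to kept, the tail is pruned of the head's substrings
def pvSieve : List String → List String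
  | [] => []
  | m :: remaining =>
      m :: pvSieve (remaining.filter (fun o => !(PySem.Str.isIn o m)))
termination_by l => l.length
decreasing_by simpa using Nat.lt_succ_of_le ((List.length_filter_le _ _).trans (le_of_eq (by simp)))

def drop_redundant_messages_alt (messages : List String) : List String :=
  PySem.Set.ofList (pvSieve (PySem.List.sorted messages (fun m => PySem.Str.len m) true))

-- ===== PRECONDITION & SPEC =====
def Spec_drop_redundant_messages (messages : List String) (out : List String) : Prop := out = drop_redundant_messages_alt messages
instance (messages : List String) (out : List String) : Decidable (Spec_drop_redundant_messages messages out) := by unfold Spec_drop_redundant_messages; infer_instance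

-- ===== CLAIM (what is proved, stated in full; the proofs are below) =====
def Claim_equal_drop_redundant_messages : Prop := ∀ (messages : List String), Dom_drop_redundant_messages messages → Spec_drop_redundant_messages messages (drop_redundant_messages messages)

-- ===== LEMMAS AND PROOFS =====

-- m itself is a substring of m
lemma pv_isIn_self (m : String) : PySem.Str.isIn m m = true :=
  (PySem.Str.isIn_iff_infix m m).mpr (List.infix_refl _)

-- core correspondence: A's fold starting from kept-set F equals F followed by the sieve of the
-- rest pruned of everything some member of F contains (A only ever tests against kept messages)
lemma pv_fold_eq_sieve :
    ∀ (rest F : List String),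
      rest.foldl
        (fun filtered_messages message =>
          if filtered_messages.any (fun filtered_message => PySem.Str.isIn message filtered_message)
          then filtered_messages
          else PySem.Set.add filtered_messages message) F
      = F ++ pvSieve (rest.filter (fun o => !(F.any (fun f => PySem.Str.isIn o f)))) := by
  intro rest
  induction rest with
  | nil => intro F; rw [List.filter_nil]; simp only [pvSieve]; simp
  | cons m rest ih =>
    intro F
    simp only [List.foldl_cons, List.filter_cons]
    cases h : (F.any fun f => PySem.Str.isIn m f) with
    | true =>
      simpa using ih F
    | false =>
      have hmF : m ∉ F := fun hm => by
        rw [List.any_eq_true.mpr ⟨m, hm, pv_isIn_self m⟩] at h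
        exact Bool.true_eq_false.mp h
      simp only [Bool.false_eq_true, Bool.not_false, reduceIte]
      rw [PySem.Set.add_of_not_mem hmF, ih (F ++ [m])]
      simp only [pvSieve, List.filter_filter, List.append_assoc, List.singleton_append]
      congr 3
      apply List.filter_congr
      intro o _
      cases hom : PySem.Str.isIn o m <;>
        cases hof : (F.any fun f => PySem.Str.isIn o f) <;>
          simp only [PySem.Str.isIn] at hom hof <;>
            simp [PySem.Str.isIn, List.any_append, hom, hof]

-- every sieve output element comes from the input list
lemma pv_sieve_subset : ∀ (l : List String), ∀ x ∈ pvSieve l, x ∈ l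
  | [] => by simp [pvSieve]
  | m :: rest => by
      simp only [pvSieve]
      intro x hx
      rcases List.mem_cons.mp hx with h | h
      · exact h ▸ List.mem_cons_self
      · exact List.mem_cons_of_mem _ (List.mem_of_mem_filter (pv_sieve_subset _ x h))
termination_by l => l.length
decreasing_by simpa using Nat.lt_succ_of_le ((List.length_filter_le _ _).trans (le_of_eq (by simp)))

-- the sieve never keeps a message twice (the head prunes its duplicates)
lemma pv_sieve_nodup : ∀ (l : List String), (pvSieve l).Nodup
  | [] => by simp [pvSieve]
  | m :: rest => by
      simp only [pvSieve]
      refine List.nodup_cons.mpr ⟨fun hm => ?_, pv_sieve_nodup _⟩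
      have := List.of_mem_filter (pv_sieve_subset _ m hm)
      rw [pv_isIn_self m] at this
      simp at this
termination_by l => l.length
decreasing_by simpa using Nat.lt_succ_of_le ((List.length_filter_le _ _).trans (le_of_eq (by simp)))

lemma pv_foldl_add_of_nodup :
    ∀ (l acc : List String), l.Nodup → (∀ x ∈ l, x ∉ acc) →
      l.foldl PySem.Set.add acc = acc ++ l := by
  intro l
  induction l with
  | nil => simp
  | cons x t ih =>
    intro acc hnd hdisj
    rcases List.nodup_cons.mp hnd with ⟨hx, ht⟩
    rw [List.foldl_cons, PySem.Set.add_of_not_mem (hdisj x List.mem_cons_self),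
      ih (acc ++ [x]) ht ?_]
    · simp
    · intro y hy hmem
      rcases List.mem_append.mp hmem with h | h
      · exact hdisj y (List.mem_cons_of_mem _ hy) h
      · exact hx (List.mem_singleton.mp h ▸ hy)

-- set(kept) of a duplicate-free kept list is the list itself
lemma pv_ofList_eq_self_of_nodup {l : List String} (h : l.Nodup) :
    PySem.Set.ofList l = l := by
  rw [PySem.Set.ofList_eq_foldl, pv_foldl_add_of_nodup l [] h (by simp)]
  simp

-- ===== VERDICT (by name: the statement is the Claim_ definition above) =====
theorem drop_redundant_messages_spec : Claim_equal_drop_redundant_messages := by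
  intro messages _
  unfold Spec_drop_redundant_messages drop_redundant_messages drop_redundant_messages_alt
  rw [pv_fold_eq_sieve _ PySem.Set.empty,
    pv_ofList_eq_self_of_nodup (pv_sieve_nodup _)]
  simp [PySem.Set.empty]
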